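-- pv_equiv track=rewrite | github.com/LittlematchLM/sea_ice_classification | extract_sigmod0.py | split_file_day
-- ===== SOURCE A (Python) =====
-- def split_file_day(files):
--     # 按照天来划分文件，同一天的内容在一个list里面
--     file_list = []
--     list = []
--     for i in range(len(files)):
--
--         if i == 0:
--             list.append(files[i])
--             continue
--
--         if (files[i].split('_')[8].split('T')[0]) == (files[i - 1].split('_')[8].split('T')[0]):
--             list.append(files[i])
--         else:
--             file_list.append(list)
--             list = []
--             list.append(files[i])
--     file_list.append(list)
--     return file_list
-- ===== SOURCE B (Python) =====
-- def split_file_day(files):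
--     # Recursive run-splitting: peel off the maximal leading run of files whose
--     # adjacent day keys agree, recurse on the rest.  Empty input gives []
--     # (no files, no groups).
--     def day(f):
--         return f.split('_')[8].split('T')[0]
--
--     def groups(fs):
--         if not fs:
--             return []
--         j = 1
--         while j < len(fs) and day(fs[j]) == day(fs[j - 1]):
--             j += 1
--         return [fs[:j]] + groups(fs[j:])
--
--     return groups(files)
-- ===== Notes on version B (the rewrite author's own statement) =====
-- stated objective: simpler
-- what changed: Replaces A's index loop with previous-key tracking and flush-on-change accumulator by a recursive run-splitter that peels off the maximal leading run of equal day keys.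
-- intended difference: On the empty list A returns [[]] (one empty group, the leftover accumulator flushed at the end) while B returns [] (no groups), which is the intended result of grouping no files. — e.g. on split_file_day([]): A returns [[]], B returns []
import Mathlib
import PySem

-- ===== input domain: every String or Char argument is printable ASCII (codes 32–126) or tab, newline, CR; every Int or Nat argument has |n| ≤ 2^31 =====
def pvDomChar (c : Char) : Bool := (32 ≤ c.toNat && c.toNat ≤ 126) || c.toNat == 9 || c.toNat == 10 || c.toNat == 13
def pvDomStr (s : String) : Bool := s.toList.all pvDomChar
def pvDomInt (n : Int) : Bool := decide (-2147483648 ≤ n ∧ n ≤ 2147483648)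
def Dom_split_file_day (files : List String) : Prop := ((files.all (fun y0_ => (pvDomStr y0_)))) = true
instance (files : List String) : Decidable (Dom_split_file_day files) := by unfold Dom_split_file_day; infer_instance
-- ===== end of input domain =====

-- B groups consecutive files by day key recursively instead of A's previous-key flush loop;
-- on the empty list A returns [[]] and B the intended [] (see D_ below).

-- ===== PORT A =====
-- f.split('_')[8].split('T')[0]; the [8] index is in range on Pre_ (getD "" is never hit there),
-- and split never returns [], so [0] is exact.
def pvDay (f : String) : String :=
  PySem.List.pyGetD ((PySem.Str.split? ((PySem.List.pyGet? ((PySem.Str.split? f "_").getD []) 8).getD "") "T").getD []) 0 ""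

-- loop body of A: state = (file_list, list)
def pvStepA (files : List String) (st : List (List String) × List String) (i : Int) :
    List (List String) × List String :=
  if i = 0 then (st.1, st.2 ++ [PySem.List.pyGetD files i ""])
  else if pvDay (PySem.List.pyGetD files i "") = pvDay (PySem.List.pyGetD files (i - 1) "") then
    (st.1, st.2 ++ [PySem.List.pyGetD files i ""])
  else
    (st.1 ++ [st.2], [PySem.List.pyGetD files i ""])

def split_file_day (files : List String) : List (List String) :=
  let st := (PySem.List.pyRange 0 (PySem.List.len files) 1).foldl (pvStepA files) ([], [])
  st.1 ++ [st.2]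

-- ===== PORT B =====
-- the inner while loop of Source B: split off the maximal leading run of adjacent equal day keys
def pvRun (prev : String) : List String → List String × List String
  | [] => ([], [])
  | f :: rest =>
      if pvDay f = pvDay prev then
        let p := pvRun f rest
        (f :: p.1, p.2)
      else ([], f :: rest)

theorem pvRun_snd_length_le (k : String) : ∀ fs : List String, (pvRun k fs).2.length ≤ fs.length := by
  intro fs
  induction fs generalizing k with
  | nil => simp [pvRun]
  | cons f rest ih =>
      simp only [pvRun]
      split
      · simpa using Nat.le_succ_of_le (ih f)
      · simp

def pvGroupsB : List String → List (List String)
  | [] => []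
  | f :: rest =>
      let p := pvRun f rest
      (f :: p.1) :: pvGroupsB p.2
  termination_by fs => fs.length
  decreasing_by
    exact Nat.lt_succ_of_le (pvRun_snd_length_le f rest)

def split_file_day_alt (files : List String) : List (List String) :=
  pvGroupsB files

-- ===== PRECONDITION & SPEC =====
-- A raises IndexError on f.split('_')[8] when some file has fewer than 9 '_'-parts and the
-- list has ≥ 2 elements (with ≤ 1 elements the key is never computed); Pre_ is exactly where A returns.
def Pre_split_file_day (files : List String) : Prop :=
  files.length ≤ 1 ∨ ∀ f ∈ files, 9 ≤ ((PySem.Str.split? f "_").getD []).length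
instance (files : List String) : Decidable (Pre_split_file_day files) := by
  unfold Pre_split_file_day; infer_instance

def pvWitness_split_file_day : List String :=
  ["a_b_c_d_e_f_g_h_20200101T1", "a_b_c_d_e_f_g_h_20200101T2", "a_b_c_d_e_f_g_h_20200102T1"]

-- On the empty list A returns [[]] (the leftover accumulator flushed at the end) while B returns
-- [] (no groups), which is the intended result of grouping no files.
def D_split_file_day (files : List String) : Prop := files = []
instance (files : List String) : Decidable (D_split_file_day files) := by
  unfold D_split_file_day; infer_instance

def Spec_split_file_day (files : List String) (out : List (List String)) : Prop :=
  ¬ D_split_file_day files → out = split_file_day_alt files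
instance (files : List String) (out : List (List String)) : Decidable (Spec_split_file_day files out) := by
  unfold Spec_split_file_day; infer_instance

def pvDiffWitness_split_file_day : List String := []
def pvDiffWitnessOut_split_file_day : (List (List String)) × (List (List String)) := ([[]], [])

-- ===== CLAIM =====
def Claim_unchanged_split_file_day : Prop := ∀ (files : List String), Dom_split_file_day files → Pre_split_file_day files → Spec_split_file_day files (split_file_day files)
def Claim_changed_split_file_day : Prop := Dom_split_file_day (pvDiffWitness_split_file_day) ∧ Pre_split_file_day (pvDiffWitness_split_file_day) ∧ D_split_file_day (pvDiffWitness_split_file_day) ∧ split_file_day (pvDiffWitness_split_file_day) = pvDiffWitnessOut_split_file_day.1 ∧ split_file_day_alt (pvDiffWitness_split_file_day) = pvDiffWitnessOut_split_file_day.2 ∧ pvDiffWitnessOut_split_file_day.1 ≠ pvDiffWitnessOut_split_file_day.2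
def Claim_exact_split_file_day : Prop := ∀ (files : List String), Dom_split_file_day files → Pre_split_file_day files → D_split_file_day files → split_file_day files ≠ split_file_day_alt files

-- ===== LEMMAS AND PROOFS =====

-- A's loop, reformulated as structural recursion carrying (accumulator, current group, previous file).
def pvGoA (acc : List (List String)) (cur : List String) (prev : String) :
    List String → List (List String) × List String
  | [] => (acc, cur)
  | x :: xs =>
      if pvDay x = pvDay prev then pvGoA acc (cur ++ [x]) x xs
      else pvGoA (acc ++ [cur]) [x] x xs

theorem pvGetD_nat (files : List String) (k : Nat) (hk : k < files.length) :
    PySem.List.pyGetD files (k : Int) "" = files[k] := by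
  rw [PySem.List.pyGetD_natCast]
  simp [List.getD, List.getElem?_eq_getElem hk]

-- the fold over indices j..n equals pvGoA on the dropped suffix
theorem pvLoopA_eq (files : List String) :
    ∀ (m j : Nat) (acc : List (List String)) (cur : List String),
      files.length - j = m → 1 ≤ j → j ≤ files.length →
      (PySem.List.pyRange (j : Int) (files.length : Int) 1).foldl (pvStepA files) (acc, cur)
        = pvGoA acc cur (files.getD (j - 1) "") (files.drop j) := by
  intro m
  induction m with
  | zero =>
      intro j acc cur hn h1 hle
      have hj : j = files.length := by omega
      subst hj
      rw [PySem.List.pyRange_one_eq_nil (le_refl _)]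
      simp [pvGoA]
  | succ m ih =>
      intro j acc cur hn h1 hle
      have hlt : j < files.length := by omega
      rw [PySem.List.pyRange_one_cons (by exact_mod_cast hlt)]
      simp only [List.foldl_cons]
      have hj0 : ¬ (j = 0) := by omega
      have hget : PySem.List.pyGetD files (j : Int) "" = files[j] := pvGetD_nat files j hlt
      have hget' : PySem.List.pyGetD files ((j : Int) - 1) "" = files[j - 1] := by
        rw [show (j : Int) - 1 = ((j - 1 : Nat) : Int) by omega]
        exact pvGetD_nat files (j - 1) (by omega)
      have hdrop : files.drop j = files[j] :: files.drop (j + 1) :=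
        List.drop_eq_getElem_cons hlt
      have hprev : files.getD (j - 1) "" = files[j - 1] := by
        simp [List.getD, List.getElem?_eq_getElem (show j - 1 < files.length by omega)]
      have hnext : ((j : Int) + 1) = ((j + 1 : Nat) : Int) := by push_cast; ring
      have hprev' : files.getD (j + 1 - 1) "" = files[j] := by
        simp [List.getD, List.getElem?_eq_getElem hlt]
      rw [hdrop, hprev]
      by_cases hk : pvDay files[j] = pvDay files[j - 1]
      · have hstep : pvStepA files (acc, cur) (j : Int) = (acc, cur ++ [files[j]]) := by
          simp [pvStepA, hget, hget', hk, hj0]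
        rw [hstep, hnext, ih (j + 1) acc (cur ++ [files[j]]) (by omega) (by omega) (by omega),
          hprev']
        simp [pvGoA, hk]
      · have hstep : pvStepA files (acc, cur) (j : Int) = (acc ++ [cur], [files[j]]) := by
          simp [pvStepA, hget, hget', hk, hj0]
        rw [hstep, hnext, ih (j + 1) (acc ++ [cur]) [files[j]] (by omega) (by omega) (by omega),
          hprev']
        simp [pvGoA, hk]

-- flushing pvGoA's final state yields the run decomposition
theorem pvGoA_flush :
    ∀ (xs : List String) (acc : List (List String)) (cur : List String) (prev : String),
      (pvGoA acc cur prev xs).1 ++ [(pvGoA acc cur prev xs).2]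
        = acc ++ ((cur ++ (pvRun prev xs).1) :: pvGroupsB (pvRun prev xs).2) := by
  intro xs
  induction xs with
  | nil => intro acc cur prev; simp [pvGoA, pvRun, pvGroupsB]
  | cons x xs ih =>
      intro acc cur prev
      by_cases hk : pvDay x = pvDay prev
      · rw [pvGoA, if_pos hk, pvRun, if_pos hk, ih]
        simp
      · rw [pvGoA, if_neg hk, pvRun, if_neg hk, ih]
        rw [pvGroupsB]
        simp

-- ===== VERDICT =====
theorem split_file_day_spec : Claim_unchanged_split_file_day := by
  intro files _ _ hD
  match files with
  | [] => exact absurd rfl hD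
  | f :: rest =>
      unfold split_file_day split_file_day_alt
      have hlen : PySem.List.len (f :: rest) = ((rest.length + 1 : Nat) : Int) := by
        simp [PySem.List.len]
      rw [hlen, PySem.List.pyRange_one_cons (by positivity)]
      simp only [List.foldl_cons]
      have h0 : pvStepA (f :: rest) ([], []) 0 = ([], [f]) := by
        simp [pvStepA]
      rw [h0, show ((0 : Int) + 1) = ((1 : Nat) : Int) by norm_num,
        show ((rest.length + 1 : Nat) : Int) = (((f :: rest).length : Nat) : Int) by simp,
        pvLoopA_eq (f :: rest) rest.length 1 [] [f] (by simp) (le_refl _) (by simp)]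
      rw [pvGoA_flush]
      simp only [List.getD, List.drop_one, List.tail_cons]
      rw [pvGroupsB]
      simp

theorem split_file_day_changed : Claim_changed_split_file_day := by
  unfold Claim_changed_split_file_day
  refine ⟨by decide, by decide, by decide, by decide, ?_, by decide⟩
  simp [pvDiffWitness_split_file_day, pvDiffWitnessOut_split_file_day,
    split_file_day_alt, pvGroupsB]

theorem split_file_day_tight : Claim_exact_split_file_day := by
  intro files _ _ hD
  subst hD
  have hB : split_file_day_alt [] = [] := by simp [split_file_day_alt, pvGroupsB]
  have hA : split_file_day [] = [[]] := by decide
  rw [hA, hB]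
  decide
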